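-- pv_equiv track=rewrite | github.com/edgarcosta/amortizedHGM | amortizedHGM/hgm.py | finitediff
-- ===== SOURCE A (Python) =====
-- def finitediff(k, M, a=0):
--     """
--     INPUT:
--
--     - k, a positive integer
--     - M, a vector with (n + 1) elements, representing M(Y) = M_0 + M_1 * Y + M_2 Y^2 + ... + M_n * Y^n
--
--     OUTPUT:
--
--     - an interator yielding M(a + i) for i = 0, ..., k - 1
--
--     EXAMPLES::
--
--         sage: [elt for elt in finitediff(10, [1, 2, 3, 4])]
--         [1, 10, 49, 142, 313, 586, 985, 1534, 2257, 3178]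
--
--         sage: [elt for elt in finitediff(10, [1, 2, 3, 4, 5, 6, 7])]
--         [1, 28, 769, 7108, 36409, 131836, 380713, 937924, 2054353, 4110364]
--
--         sage: [elt for elt in finitediff(3, [1, 2, 3, 4, 5, 6, 7])]
--         [1, 28, 769]
--     """
--     # degree of M
--     n = len(M) - 1
--     # Mfd[i] = M(i)
--     Mfd = [None]*(n + 1)
--     for i in range(min(k, n + 1)):
--         res = 0
--         aitoj = 1
--         ai = a + i
--         for j, Mj in enumerate(M):
--             # aitoj = (a + i)^j
--             res += Mj*aitoj
--             aitoj *= ai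
--         Mfd[i] = res
--         yield res
--     if k > n + 1:
--         # now update Mfd such that
--         # M[n] = M(n)
--         # M[n-1] = M(n) - M(n-1) = M[n-1, n]
--         # ....
--         # Mfd[n - l] = Mfd[a - l, a - l + 1, ..., a]
--         #        = Mfd[a - l + 1, ..., a] - Mfd[a - l, ..., a - 1]
--         # where a = n
--         for l in range(0, n + 1):
--             for j in range(0, n - l):
--                 Mfd[j] = Mfd[j + 1] - Mfd[j]
--
--         for i in range(n + 1, k):
--             # update Mfd
--             # Mfd[0] = Mfd[a - n, a - n + 1, ..., a] is constant
--             # and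
--             # Mfd[a - n, a - n + 1, ..., a, a + 1] = 0
--             for l in range(1, n + 1):
--                 # We have
--                 # Mfd[l - 1] = M[(a + 1) - (n- l -1), ..., (a + 1)]
--                 # Mfd[l] = M[a - n -l, ..., a]
--                 # and
--                 #
--                 # M[(a + 1) - (n- l -1), ..., (a + 1)]  =
--                 #           M[(a + 1) - n -l, ..., a + 1] - M[a - n -l, ..., a]
--                 # Thus
--                 # M[(a + 1) - n -l, ..., a + 1] = Mfd[l] + Mfd[l - 1]
--                 Mfd[l] = Mfd[l] + Mfd[l-1]
--             # Mfd[i]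
--             yield Mfd[n]
-- ===== SOURCE B (Python) =====
-- def finitediff(k, M, a=0):
--     # Direct Horner evaluation of M at each point a+i; no difference table.
--     for i in range(k):
--         x = a + i
--         res = 0
--         for c in reversed(M):
--             res = res * x + c
--         yield res
-- ===== Notes on version B (the rewrite author's own statement) =====
-- stated objective: simpler
-- what changed: Replaces the finite-difference table (seed evaluations, a triangular differencing pass, and per-step column propagation) with a plain loop that evaluates the polynomial independently at each point a+i by Horner's rule.
import Mathlib
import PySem

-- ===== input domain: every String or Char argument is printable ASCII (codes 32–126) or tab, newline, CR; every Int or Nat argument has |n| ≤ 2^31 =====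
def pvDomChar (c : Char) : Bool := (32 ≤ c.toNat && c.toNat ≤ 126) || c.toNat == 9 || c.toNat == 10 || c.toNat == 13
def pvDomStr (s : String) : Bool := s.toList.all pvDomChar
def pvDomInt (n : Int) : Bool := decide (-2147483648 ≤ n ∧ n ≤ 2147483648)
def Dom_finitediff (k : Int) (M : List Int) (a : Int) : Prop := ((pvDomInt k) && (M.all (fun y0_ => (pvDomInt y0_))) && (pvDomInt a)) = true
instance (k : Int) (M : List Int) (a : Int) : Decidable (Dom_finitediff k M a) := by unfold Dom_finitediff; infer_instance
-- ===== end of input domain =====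

-- B drops A's finite-difference table and evaluates the polynomial independently at each
-- point a+i by Horner's rule (objective: simpler). Both are ports of generators, compared
-- as the list of yielded values.

-- ===== PORT A =====
-- inner loop of A's seed phase: res/aitoj accumulator over the coefficients
def pvEvalA (a i : Int) (M : List Int) : Int :=
  (M.foldl (fun (p : Int × Int) Mj => (p.1 + Mj * p.2, p.2 * (a + i))) (0, 1)).1

def finitediff (k : Int) (M : List Int) (a : Int) : List Int :=
  let n : Int := (M.length : Int) - 1
  -- first loop: Mfd[i] = M(a+i) for i in range(min(k, n+1)), each value also yielded
  let Mfd : List Int := (PySem.List.pyRange 0 (min k (n + 1)) 1).map (fun i => pvEvalA a i M)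
  if k > n + 1 then
    -- triangular differencing pass
    let Mfd2 := (PySem.List.pyRange 0 (n + 1) 1).foldl (fun fd l =>
        (PySem.List.pyRange 0 (n - l) 1).foldl (fun fd j =>
            fd.set j.toNat (fd.getD (j.toNat + 1) 0 - fd.getD j.toNat 0)) fd) Mfd
    -- remaining yields: propagate the difference column, yield Mfd[n] each step
    let st := (PySem.List.pyRange (n + 1) k 1).foldl (fun (st : List Int × List Int) _i =>
        let fd := (PySem.List.pyRange 1 (n + 1) 1).foldl (fun fd l =>
            fd.set l.toNat (fd.getD l.toNat 0 + fd.getD (l.toNat - 1) 0)) st.1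
        (fd, st.2 ++ [fd.getD n.toNat 0])) (Mfd2, ([] : List Int))
    Mfd ++ st.2
  else
    Mfd

-- ===== PORT B =====
def finitediff_alt (k : Int) (M : List Int) (a : Int) : List Int :=
  (PySem.List.pyRange 0 k 1).map (fun i =>
    M.reverse.foldl (fun res c => res * (a + i) + c) 0)

-- ===== PRECONDITION & SPEC =====
-- Pre_ excludes only empty M with k > 0, where A raises IndexError (Mfd[-1] on an empty table).
def Pre_finitediff (k : Int) (M : List Int) (a : Int) : Prop := M ≠ [] ∨ k ≤ 0
instance (k : Int) (M : List Int) (a : Int) : Decidable (Pre_finitediff k M a) := by unfold Pre_finitediff; infer_instance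
def pvWitness_finitediff : Int × List Int × Int := (10, [1, 2, 3, 4], 0)

def Spec_finitediff (k : Int) (M : List Int) (a : Int) (out : List Int) : Prop := out = finitediff_alt k M a
instance (k : Int) (M : List Int) (a : Int) (out : List Int) : Decidable (Spec_finitediff k M a out) := by unfold Spec_finitediff; infer_instance

-- ===== CLAIM (what is proved, stated in full; the proofs are below) =====
def Claim_equal_finitediff : Prop := ∀ (k : Int) (M : List Int) (a : Int), Dom_finitediff k M a → Pre_finitediff k M a → Spec_finitediff k M a (finitediff k M a)

-- ===== LEMMAS AND PROOFS =====

def pvE (M : List Int) (x : Int) : Int := M.foldr (fun c acc => acc * x + c) 0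

def pvDD (M : List Int) : Nat → Int → Int
  | 0, x => pvE M x
  | m + 1, x => pvDD M m (x + 1) - pvDD M m x

theorem foldA (M : List Int) (x : Int) : ∀ r p : Int,
    (M.foldl (fun (q : Int × Int) Mj => (q.1 + Mj * q.2, q.2 * x)) (r, p)).1 = r + p * pvE M x := by
  induction M with
  | nil => intro r p; simp [pvE]
  | cons c t ih => intro r p; simp only [List.foldl_cons, ih, pvE, List.foldr_cons]; ring

theorem pvDD_nil (m : Nat) (x : Int) : pvDD [] m x = 0 := by
  induction m generalizing x with
  | zero => simp [pvDD, pvE]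
  | succ m ih => simp [pvDD, ih]

theorem pvDD_cons (c : Int) (t : List Int) (m : Nat) (x : Int) :
    pvDD (c :: t) (m + 1) x = x * pvDD t (m + 1) x + (m + 1) * pvDD t m (x + 1) := by
  induction m generalizing x with
  | zero => simp only [pvDD, pvE, List.foldr_cons]; ring
  | succ m ih =>
    have h1 := ih (x + 1)
    have h2 := ih x
    show pvDD (c :: t) (m + 1) (x + 1) - pvDD (c :: t) (m + 1) x = _
    rw [h1, h2]
    rw [show pvDD t (m + 1 + 1) x = pvDD t (m+1) (x+1) - pvDD t (m+1) x from rfl,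
        show pvDD t (m + 1) (x + 1) = pvDD t m (x + 1 + 1) - pvDD t m (x+1) from rfl]
    push_cast
    ring

theorem pvDD_length (M : List Int) (x : Int) : pvDD M M.length x = 0 := by
  induction M generalizing x with
  | nil => exact pvDD_nil 0 x
  | cons c t ih =>
    rw [show (c :: t).length = t.length + 1 from rfl, pvDD_cons,
        show pvDD t (t.length + 1) x = pvDD t t.length (x+1) - pvDD t t.length x from rfl,
        ih (x+1), ih x]
    ring

theorem pvDD_top_step (c : Int) (t : List Int) (x : Int) :
    pvDD (c :: t) t.length (x + 1) = pvDD (c :: t) t.length x := by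
  have h := pvDD_length (c :: t) x
  rw [show (c :: t).length = t.length + 1 from rfl,
      show pvDD (c :: t) (t.length + 1) x = pvDD (c :: t) t.length (x+1) - pvDD (c :: t) t.length x from rfl] at h
  omega

theorem pvDD_top_const (c : Int) (t : List Int) (x y : Int) :
    pvDD (c :: t) t.length x = pvDD (c :: t) t.length y := by
  have key : ∀ d : Int, pvDD (c :: t) t.length (x + d) = pvDD (c :: t) t.length x := by
    intro d
    induction d using Int.induction_on with
    | zero => rw [add_zero]
    | succ n ih => rw [show x + (n+1:Int) = (x + n) + 1 by ring, pvDD_top_step, ih]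
    | pred n ih => rw [show x + (-n:Int) = (x + (-n-1)) + 1 by ring, pvDD_top_step] at ih; exact ih
  have := key (y - x); rw [show x + (y - x) = y by ring] at this; exact this.symm

theorem getD_set_eq (l : List Int) (i : Nat) (v : Int) (h : i < l.length) :
    (l.set i v).getD i 0 = v := by
  simp [List.getD, h]

theorem getD_set_ne (l : List Int) (i j : Nat) (v : Int) (h : i ≠ j) :
    (l.set i v).getD j 0 = l.getD j 0 := by
  simp [List.getD, h]

def triStep (fd : List Int) (j : Nat) : List Int :=
  fd.set j (fd.getD (j + 1) 0 - fd.getD j 0)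

def pushStep (fd : List Int) (l : Nat) : List Int :=
  fd.set l (fd.getD l 0 + fd.getD (l - 1) 0)

theorem length_tri_sweep (fd : List Int) (m : Nat) :
    ((List.range m).foldl triStep fd).length = fd.length := by
  induction m generalizing fd with
  | zero => rfl
  | succ m ih => rw [List.range_succ, List.foldl_append]; simp [triStep, ih, List.length_set]

theorem tri_sweep (fd : List Int) (m : Nat) (hm : m < fd.length) (j : Nat) :
    ((List.range m).foldl triStep fd).getD j 0 =
      if j < m then fd.getD (j + 1) 0 - fd.getD j 0 else fd.getD j 0 := by
  induction m generalizing j with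
  | zero => simp
  | succ m ih =>
    rw [List.range_succ, List.foldl_append]
    simp only [List.foldl_cons, List.foldl_nil]
    have hm' : m < fd.length := Nat.lt_of_succ_lt hm
    have hlen : ((List.range m).foldl triStep fd).length = fd.length := length_tri_sweep fd m
    by_cases hj : j = m
    · subst hj
      rw [triStep, getD_set_eq _ _ _ (by rw [hlen]; exact hm'),
          ih (by omega) (j + 1), ih (by omega) j]
      simp
    · rw [triStep, getD_set_ne _ _ _ _ (fun h => hj h.symm), ih hm' j]
      rcases Nat.lt_trichotomy j m with h | h | h
      · simp [h, Nat.lt_succ_of_lt h]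
      · exact absurd h hj
      · simp [Nat.not_lt_of_lt h, show ¬ j < m + 1 by omega]

theorem length_push_sweep (fd : List Int) (m : Nat) :
    ((List.range m).foldl (fun fd K => pushStep fd (K + 1)) fd).length = fd.length := by
  induction m generalizing fd with
  | zero => rfl
  | succ m ih =>
    rw [List.range_succ, List.foldl_append]
    simp only [List.foldl_cons, List.foldl_nil, pushStep, List.length_set]
    exact ih fd

-- after the propagation sweep over l = 1..m the table holds prefix sums of the old column

theorem push_sweep (fd : List Int) (m : Nat) (hm : m < fd.length) (j : Nat) :
    ((List.range m).foldl (fun fd K => pushStep fd (K + 1)) fd).getD j 0 =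
      if j ≤ m then ((List.range (j + 1)).map (fun t => fd.getD t 0)).sum else fd.getD j 0 := by
  induction m generalizing j with
  | zero =>
    simp only [List.range_zero, List.foldl_nil]
    by_cases hj : j = 0
    · subst hj; simp
    · simp [show ¬ j ≤ 0 by omega]
  | succ m ih =>
    rw [List.range_succ, List.foldl_append]
    simp only [List.foldl_cons, List.foldl_nil]
    have hm' : m < fd.length := Nat.lt_of_succ_lt hm
    have hlen := length_push_sweep fd m
    by_cases hj : j = m + 1
    · subst hj
      rw [pushStep, getD_set_eq _ _ _ (by rw [hlen]; exact hm),
          Nat.add_sub_cancel, ih hm' (m + 1), ih hm' m]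
      simp only [show ¬ m + 1 ≤ m by omega, if_false, Nat.le_refl, if_true, Nat.le_refl]
      rw [List.range_succ (n := m + 1), List.map_append, List.sum_append]
      simp only [List.map_cons, List.map_nil, List.sum_cons, List.sum_nil, add_zero]; ring
    · rw [pushStep, getD_set_ne _ _ _ _ (fun h => hj h.symm), ih hm' j]
      rcases Nat.lt_trichotomy j (m + 1) with h | h | h
      · rw [if_pos (by omega), if_pos (by omega)]
      · exact absurd h hj
      · rw [if_neg (by omega), if_neg (by omega)]

theorem pvEvalA_eq (a i : Int) (M : List Int) : pvEvalA a i M = pvE M (a + i) := by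
  have := foldA (x := a + i) M 0 1
  simpa [pvEvalA] using this

-- Nat-world version of A's big-k branch

theorem finitediff_big (k : Int) (c a : Int) (t : List Int) (h : (t.length : Int) + 1 < k) :
    finitediff k (c :: t) a =
      (List.range (t.length + 1)).map (fun i : Nat => pvE (c :: t) (a + (i : Int))) ++
      ((List.range (k - ((t.length : Int) + 1)).toNat).foldl
        (fun (st : List Int × List Int) _ =>
          let fd := (List.range t.length).foldl (fun fd K => pushStep fd (K + 1)) st.1
          (fd, st.2 ++ [fd.getD t.length 0]))
        (((List.range (t.length + 1)).foldl
            (fun fd L => (List.range (t.length - L)).foldl triStep fd)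
            ((List.range (t.length + 1)).map (fun i : Nat => pvE (c :: t) (a + (i : Int))))), ([] : List Int))).2 := by
  have hn : ((c :: t).length : Int) - 1 = (t.length : Int) := by simp
  have hmin : min k ((t.length : Int) + 1) = (t.length : Int) + 1 := by omega
  have hseed : (PySem.List.pyRange 0 (min k ((t.length : Int) + 1)) 1).map
      (fun i => pvEvalA a i (c :: t)) =
      (List.range (t.length + 1)).map (fun i : Nat => pvE (c :: t) (a + (i : Int))) := by
    rw [hmin, PySem.List.pyRange_one]
    simp only [show ((t.length : Int) + 1 - 0).toNat = t.length + 1 by omega, List.map_map]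
    apply List.map_congr_left
    intro x hx
    simp [pvEvalA_eq]
  have htri : ∀ S : List Int,
      (PySem.List.pyRange 0 ((t.length : Int) + 1) 1).foldl (fun fd l =>
        (PySem.List.pyRange 0 ((t.length : Int) - l) 1).foldl (fun fd j =>
          fd.set j.toNat (fd.getD (j.toNat + 1) 0 - fd.getD j.toNat 0)) fd) S =
      (List.range (t.length + 1)).foldl (fun fd L => (List.range (t.length - L)).foldl triStep fd) S := by
    intro S
    rw [PySem.List.pyRange_one]
    simp only [show ((t.length : Int) + 1 - 0).toNat = t.length + 1 by omega, List.foldl_map]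
    apply PySem.List.foldl_congr_mem'
    intro L hL fd
    have hL' : L < t.length + 1 := List.mem_range.mp hL
    rw [PySem.List.pyRange_one]
    rw [show ((t.length : Int) - (0 + (L : Int)) - 0).toNat = t.length - L by omega, List.foldl_map]
    apply PySem.List.foldl_congr_mem'
    intro J hJ fd'
    simp [triStep]
  have hpush : ∀ S : List Int,
      (PySem.List.pyRange 1 ((t.length : Int) + 1) 1).foldl (fun fd l =>
        fd.set l.toNat (fd.getD l.toNat 0 + fd.getD (l.toNat - 1) 0)) S =
      (List.range t.length).foldl (fun fd K => pushStep fd (K + 1)) S := by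
    intro S
    rw [PySem.List.pyRange_one]
    simp only [show ((t.length : Int) + 1 - 1).toNat = t.length by omega, List.foldl_map]
    apply PySem.List.foldl_congr_mem'
    intro K hK fd
    have : ((1 : Int) + (K : Int)).toNat = K + 1 := by omega
    simp [this, pushStep]
  have hyield : ∀ S : List Int,
      (PySem.List.pyRange ((t.length : Int) + 1) k 1).foldl (fun (st : List Int × List Int) _i =>
        let fd := (PySem.List.pyRange 1 ((t.length : Int) + 1) 1).foldl (fun fd l =>
          fd.set l.toNat (fd.getD l.toNat 0 + fd.getD (l.toNat - 1) 0)) st.1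
        (fd, st.2 ++ [fd.getD (t.length : Int).toNat 0])) (S, ([] : List Int)) =
      (List.range (k - ((t.length : Int) + 1)).toNat).foldl (fun (st : List Int × List Int) _ =>
        let fd := (List.range t.length).foldl (fun fd K => pushStep fd (K + 1)) st.1
        (fd, st.2 ++ [fd.getD t.length 0])) (S, ([] : List Int)) := by
    intro S
    simp only [hpush, Int.toNat_natCast]
    rw [PySem.List.pyRange_one, List.foldl_map]
  unfold finitediff
  simp only [hn]
  rw [if_pos (by omega : k > (t.length : Int) + 1), hseed, htri, hyield]

theorem getD_map_range (f : Nat → Int) (m j : Nat) (hj : j < m) :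
    ((List.range m).map f).getD j 0 = f j := by
  simp [List.getD, hj]

theorem tri_inv (M : List Int) (a : Int) (n L : Nat) (hL : L ≤ n + 1) :
    ((List.range L).foldl (fun fd L' => (List.range (n - L')).foldl triStep fd)
        ((List.range (n + 1)).map (fun i : Nat => pvE M (a + (i : Int))))).length = n + 1 ∧
    ∀ j, j ≤ n →
      ((List.range L).foldl (fun fd L' => (List.range (n - L')).foldl triStep fd)
          ((List.range (n + 1)).map (fun i : Nat => pvE M (a + (i : Int))))).getD j 0 =
        pvDD M (min L (n - j)) (a + j) := by
  induction L with
  | zero =>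
    refine ⟨by simp, fun j hj => ?_⟩
    simp only [List.range_zero, List.foldl_nil]
    rw [getD_map_range _ _ _ (by omega)]
    simp [pvDD]
  | succ L ih =>
    obtain ⟨ihlen, ihval⟩ := ih (by omega)
    rw [show List.range (L + 1) = List.range L ++ [L] from List.range_succ,
        List.foldl_append, List.foldl_cons, List.foldl_nil]
    constructor
    · rw [length_tri_sweep, ihlen]
    · intro j hj
      rw [tri_sweep _ _ (by rw [ihlen]; omega) j]
      by_cases hcase : j < n - L
      · rw [if_pos hcase, ihval (j + 1) (by omega), ihval j (by omega)]
        have e1 : min L (n - (j + 1)) = L := by omega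
        have e2 : min L (n - j) = L := by omega
        have e3 : min (L + 1) (n - j) = L + 1 := by omega
        rw [e1, e2, e3]
        show _ = pvDD M L (a + (j:Int) + 1) - pvDD M L (a + (j:Int))
        push_cast
        ring_nf
      · rw [if_neg hcase, ihval j hj]
        congr 1
        omega

theorem sum_dd (M : List Int) (n : Nat) (x : Int)
    (hc : ∀ u v : Int, pvDD M n u = pvDD M n v) (j : Nat) (hj : j ≤ n) :
    ((List.range (j + 1)).map (fun t : Nat => pvDD M (n - t) (x + (t : Int)))).sum =
      pvDD M (n - j) (x + 1 + (j : Int)) := by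
  induction j with
  | zero => simpa using hc x (x + 1 + 0)
  | succ j ih =>
    rw [show List.range (j + 1 + 1) = List.range (j + 1) ++ [j + 1] from List.range_succ,
        List.map_append, List.sum_append, ih (by omega)]
    have hnj : n - j = (n - (j + 1)) + 1 := by omega
    rw [hnj]
    show pvDD M (n - (j+1)) (x + 1 + (j:Int) + 1) - pvDD M (n - (j+1)) (x + 1 + (j:Int)) + _ = _
    simp only [List.map_cons, List.map_nil, List.sum_cons, List.sum_nil, add_zero]
    have e1 : x + ((j:Int) + 1) = x + 1 + (j:Int) := by ring
    have e2 : x + 1 + ((j:Int) + 1) = x + 1 + (j:Int) + 1 := by ring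
    push_cast
    rw [e1, e2]
    ring

theorem yield_inv (M : List Int) (a : Int) (n : Nat)
    (hc : ∀ u v : Int, pvDD M n u = pvDD M n v)
    (fd0 : List Int) (hlen : fd0.length = n + 1)
    (h0 : ∀ j, j ≤ n → fd0.getD j 0 = pvDD M (n - j) (a + (j : Int))) (R : Nat) :
    ((List.range R).foldl (fun (st : List Int × List Int) _ =>
        let fd := (List.range n).foldl (fun fd K => pushStep fd (K + 1)) st.1
        (fd, st.2 ++ [fd.getD n 0])) (fd0, ([] : List Int))).1.length = n + 1 ∧
    (∀ j, j ≤ n →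
      ((List.range R).foldl (fun (st : List Int × List Int) _ =>
        let fd := (List.range n).foldl (fun fd K => pushStep fd (K + 1)) st.1
        (fd, st.2 ++ [fd.getD n 0])) (fd0, ([] : List Int))).1.getD j 0 =
        pvDD M (n - j) (a + (R : Int) + (j : Int))) ∧
    ((List.range R).foldl (fun (st : List Int × List Int) _ =>
        let fd := (List.range n).foldl (fun fd K => pushStep fd (K + 1)) st.1
        (fd, st.2 ++ [fd.getD n 0])) (fd0, ([] : List Int))).2 =
      (List.range R).map (fun r : Nat => pvE M (a + (n : Int) + 1 + (r : Int))) := by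
  induction R with
  | zero =>
    refine ⟨by simpa using hlen, fun j hj => ?_, by simp⟩
    simp only [List.range_zero, List.foldl_nil]
    rw [h0 j hj]
    congr 1
    push_cast
    ring
  | succ R ih =>
    obtain ⟨ihlen, ihval, ihout⟩ := ih
    rw [show List.range (R + 1) = List.range R ++ [R] from List.range_succ] at *
    simp only [List.foldl_append, List.foldl_cons, List.foldl_nil] at *
    have hfd : ∀ j, j ≤ n →
        ((List.range n).foldl (fun fd K => pushStep fd (K + 1))
          ((List.range R).foldl (fun (st : List Int × List Int) _ =>
            let fd := (List.range n).foldl (fun fd K => pushStep fd (K + 1)) st.1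
            (fd, st.2 ++ [fd.getD n 0])) (fd0, ([] : List Int))).1).getD j 0 =
          pvDD M (n - j) (a + ((R : Int) + 1) + (j : Int)) := by
      intro j hj
      rw [push_sweep _ _ (by rw [ihlen]; omega) j, if_pos hj]
      rw [List.map_congr_left (fun t ht => ihval t (by
        have := List.mem_range.mp ht; omega))]
      have := sum_dd M n (a + (R : Int)) hc j hj
      rw [this]
      congr 1
      ring
    refine ⟨?_, fun j hj => ?_, ?_⟩
    · rw [length_push_sweep, ihlen]
    · exact hfd j hj
    · rw [ihout, List.map_append]
      congr 1
      rw [hfd n (le_refl n)]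
      rw [show n - n = 0 from Nat.sub_self n]
      simp only [List.map_cons, List.map_nil, pvDD]
      congr 2
      ring

theorem alt_eq (k : Int) (M : List Int) (a : Int) :
    finitediff_alt k M a = (PySem.List.pyRange 0 k 1).map (fun i => pvE M (a + i)) := by
  unfold finitediff_alt
  apply List.map_congr_left
  intro x hx
  rw [List.foldl_reverse]
  rfl

theorem main_eq (k : Int) (M : List Int) (a : Int) (hpre : M ≠ [] ∨ k ≤ 0) :
    finitediff k M a = finitediff_alt k M a := by
  match M with
  | [] =>
    have hk : k ≤ 0 := by tauto
    unfold finitediff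
    rw [alt_eq]
    simp only [List.length_nil, Nat.cast_zero]
    rw [if_neg (by omega), PySem.List.pyRange_one_eq_nil (by omega),
        PySem.List.pyRange_one_eq_nil (by omega)]
    rfl
  | c :: t =>
    have hn : ((c :: t).length : Int) - 1 = (t.length : Int) := by simp
    by_cases hbig : (t.length : Int) + 1 < k
    · -- big-k branch
      rw [finitediff_big k c a t hbig, alt_eq,
          PySem.List.pyRange_one_append 0 ((t.length : Int) + 1) k (by omega) (by omega),
          List.map_append]
      have hfirst : (PySem.List.pyRange 0 ((t.length : Int) + 1) 1).map (fun i => pvE (c :: t) (a + i)) =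
          (List.range (t.length + 1)).map (fun i : Nat => pvE (c :: t) (a + (i : Int))) := by
        rw [PySem.List.pyRange_one]
        simp only [show ((t.length : Int) + 1 - 0).toNat = t.length + 1 by omega, List.map_map]
        apply List.map_congr_left
        intro x hx
        simp
      have hsecond : (PySem.List.pyRange ((t.length : Int) + 1) k 1).map (fun i => pvE (c :: t) (a + i)) =
          (List.range (k - ((t.length : Int) + 1)).toNat).map
            (fun r : Nat => pvE (c :: t) (a + (t.length : Int) + 1 + (r : Int))) := by
        rw [PySem.List.pyRange_one]
        simp only [List.map_map]
        apply List.map_congr_left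
        intro x hx
        show pvE (c :: t) (a + ((t.length : Int) + 1 + (x : Int))) = _
        congr 1
        ring
      rw [hfirst, hsecond]
      congr 1
      -- the yielded tail equals direct evaluation
      have hc := pvDD_top_const c t
      obtain ⟨hlen, hval⟩ := tri_inv (c :: t) a t.length (t.length + 1) (le_refl _)
      have h0 : ∀ j, j ≤ t.length →
          ((List.range (t.length + 1)).foldl (fun fd L' => (List.range (t.length - L')).foldl triStep fd)
            ((List.range (t.length + 1)).map (fun i : Nat => pvE (c :: t) (a + (i : Int))))).getD j 0 =
          pvDD (c :: t) (t.length - j) (a + (j : Int)) := by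
        intro j hj
        rw [hval j hj]
        congr 1
        omega
      obtain ⟨_, _, hout⟩ := yield_inv (c :: t) a t.length hc _ hlen h0 (k - ((t.length : Int) + 1)).toNat
      exact hout
    · -- small-k branch: only the seed loop runs
      unfold finitediff
      simp only [hn]
      rw [if_neg (by omega), alt_eq, show min k ((t.length : Int) + 1) = k by omega]
      apply List.map_congr_left
      intro x hx
      rw [pvEvalA_eq]

-- ===== VERDICT (by name: the statement is the Claim_ definition above) =====
theorem finitediff_spec : Claim_equal_finitediff := by
  intro k M a _ hpre
  unfold Spec_finitediff
  exact main_eq k M a hpre
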